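-- pv_equiv track=rewrite | github.com/Mo379/PracticePractice | APP/content/util/ContentCRUD.py | _check_short_link
-- ===== SOURCE A (Python) =====
-- def _check_short_link(short_link):
--     # the short link should match a specific pattern !!
--     pattern = ['Z_', 'A_', 'B_', 'C_', 'D_']
--     parts = short_link.split('/')
--     if len(pattern) != len(parts):
--         return 0
--     for i in range(len(pattern)):
--         part_pattern = parts[i][0:2]
--         if pattern[i] == part_pattern:
--             pass
--         else:
--             return 0
--     return 1
-- ===== SOURCE B (Python) =====
-- def _check_short_link(short_link):
--     # single left-to-right character scan: track segment index and position
--     # within the segment; no intermediate list of parts is built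
--     letters = ['Z', 'A', 'B', 'C', 'D']
--     seg = 0
--     pos = 0
--     for ch in short_link:
--         if ch == '/':
--             if pos < 2 or seg == 4:
--                 return 0
--             seg += 1
--             pos = 0
--         elif (pos == 0 and ch != letters[seg]) or (pos == 1 and ch != '_'):
--             return 0
--         else:
--             pos += 1
--     return 1 if seg == 4 and pos >= 2 else 0
-- ===== Notes on version B (the rewrite author's own statement) =====
-- stated objective: alternative
-- what changed: Replaces the split-on-slash parts list plus per-part prefix-comparison loop by a single left-to-right character scan that tracks the current segment index and position within the segment, building no intermediate list.
import Mathlib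
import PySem

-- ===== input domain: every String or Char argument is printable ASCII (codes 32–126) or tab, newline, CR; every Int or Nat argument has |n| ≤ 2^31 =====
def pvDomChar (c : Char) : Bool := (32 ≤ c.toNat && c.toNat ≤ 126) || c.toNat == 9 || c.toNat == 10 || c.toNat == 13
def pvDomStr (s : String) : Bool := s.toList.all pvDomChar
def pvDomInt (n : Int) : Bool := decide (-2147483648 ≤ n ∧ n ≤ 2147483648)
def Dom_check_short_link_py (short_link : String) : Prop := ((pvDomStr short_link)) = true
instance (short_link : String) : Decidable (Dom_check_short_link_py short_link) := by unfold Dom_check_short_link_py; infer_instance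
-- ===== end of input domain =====

-- B replaces A's split-into-parts + per-part prefix loop by a single left-to-right
-- character scan tracking (segment index, position in segment); same return value.

-- ===== PORT A =====
-- A's 'for i in range(len(pattern))' loop with early 'return 0'
def check_short_link_py_loop (pattern parts : List (List Char)) : List Int → Int
  | [] => 1
  | i :: is =>
      -- part_pattern = parts[i][0:2]; indexing is always in range here (loop runs only
      -- when len(pattern) == len(parts)), so pyGetD is a pure totality guard
      let part_pattern := PySem.List.slice (PySem.List.pyGetD parts i []) (some 0) (some 2)
      if PySem.List.pyGetD pattern i [] = part_pattern then check_short_link_py_loop pattern parts is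
      else 0

def check_short_link_py (short_link : String) : Int :=
  let pattern : List (List Char) := [['Z','_'], ['A','_'], ['B','_'], ['C','_'], ['D','_']]
  let parts := PySem.Chars.splitOn short_link.toList ['/']
  if pattern.length ≠ parts.length then 0
  else check_short_link_py_loop pattern parts (PySem.List.pyRange 0 (pattern.length : Int) 1)

-- ===== PORT B =====
def pvLetters : List Char := ['Z', 'A', 'B', 'C', 'D']

-- B's 'for ch in short_link' loop; seg ≤ 4 always holds, so letters[seg] is in
-- range and getD is a pure totality guard
def check_short_link_py_altLoop : List Char → Nat → Nat → Int
  | [], seg, pos => if seg = 4 ∧ 2 ≤ pos then 1 else 0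
  | c :: cs, seg, pos =>
      if c = '/' then
        if pos < 2 ∨ seg = 4 then 0 else check_short_link_py_altLoop cs (seg + 1) 0
      else if (pos = 0 ∧ c ≠ pvLetters.getD seg ' ') ∨ (pos = 1 ∧ c ≠ '_') then 0
      else check_short_link_py_altLoop cs seg (pos + 1)

def check_short_link_py_alt (short_link : String) : Int :=
  check_short_link_py_altLoop short_link.toList 0 0

-- ===== PRECONDITION & SPEC =====
def Spec_check_short_link_py (short_link : String) (out : Int) : Prop := out = check_short_link_py_alt short_link
instance (short_link : String) (out : Int) : Decidable (Spec_check_short_link_py short_link out) := by unfold Spec_check_short_link_py; infer_instance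

-- ===== CLAIM (what is proved, stated in full; the proofs are below) =====
def Claim_equal_check_short_link_py : Prop := ∀ (short_link : String), Dom_check_short_link_py short_link → Spec_check_short_link_py short_link (check_short_link_py short_link)

-- ===== LEMMAS AND PROOFS =====

-- check of a list of segments against a list of expected first letters
def pvChk : List (List Char) → List Char → Bool
  | [], [] => true
  | g :: gs, L :: Ls => (g.take 2 == [L, '_']) && pvChk gs Ls
  | _, _ => false

-- what remains to be checked of the current segment after `pos` matched characters
def pvSegOK (seg pos : Nat) (g : List Char) : Bool :=
  if 2 ≤ pos then true
  else if pos = 1 then g.take 1 == ['_']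
  else g.take 2 == [pvLetters.getD seg ' ', '_']

lemma pv_slice2 (l : List Char) : PySem.List.slice l (some 0) (some 2) = l.take 2 := by
  simp [pysem]

lemma pv_go_spec (fuel : Nat) : ∀ (l cur : List Char) (acc : List (List Char)), l.length < fuel →
    PySem.Chars.splitOn.go ['/'] fuel l cur acc
      = acc.reverse ++ List.modifyHead (cur.reverse ++ ·) (List.splitOnP (· == '/') l) := by
  induction fuel with
  | zero => intro l cur acc h; omega
  | succ f ih =>
    intro l cur acc h
    cases l with
    | nil => simp [PySem.Chars.splitOn.go, List.splitOnP_nil]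
    | cons c rest =>
      rw [PySem.Chars.splitOn.go.eq_def]
      simp only [List.isPrefixOf, Bool.and_true]
      by_cases hc : c = '/'
      · subst hc
        simp only [beq_self_eq_true, if_pos, List.length_cons]
        rw [show List.drop (([] : List Char).length + 1) ('/' :: rest) = rest by simp,
          ih rest [] (cur.reverse :: acc) (by simp at h ⊢; omega)]
        simp only [List.splitOnP_cons, beq_self_eq_true, if_true, List.reverse_nil,
          List.nil_append, List.reverse_cons, List.append_assoc, List.singleton_append]
        cases List.splitOnP (fun x => x == '/') rest <;> simp
      · rw [if_neg (by simpa using Ne.symm hc),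
          ih rest (c :: cur) acc (by simp at h ⊢; omega)]
        simp only [List.splitOnP_cons, beq_iff_eq, if_neg hc, List.modifyHead_modifyHead]
        cases List.splitOnP (· == '/') rest with
        | nil => simp
        | cons a t => simp

lemma pv_split_bridge (s : List Char) :
    PySem.Chars.splitOn s ['/'] = List.splitOnP (· == '/') s := by
  rw [PySem.Chars.splitOn, pv_go_spec (s.length + 1) s [] [] (by omega)]
  cases h : List.splitOnP (· == '/') s with
  | nil => exact absurd h (List.splitOnP_ne_nil _ _)
  | cons a t => simp

lemma pv_chk_length : ∀ (gs : List (List Char)) (Ls : List Char), pvChk gs Ls = true → gs.length = Ls.length := by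
  intro gs
  induction gs with
  | nil => intro Ls h; cases Ls with | nil => rfl | cons a t => simp [pvChk] at h
  | cons g gs ih =>
    intro Ls h
    cases Ls with
    | nil => simp [pvChk] at h
    | cons L Ls =>
      simp only [pvChk, Bool.and_eq_true] at h
      simp [ih Ls h.2]

lemma pv_a_eq (s : String) :
    check_short_link_py s = if pvChk (List.splitOnP (· == '/') s.toList) pvLetters then 1 else 0 := by
  rw [check_short_link_py]
  simp only [pv_split_bridge]
  set parts := List.splitOnP (· == '/') s.toList with hp
  by_cases h5 : parts.length = 5
  · match parts, h5 with
    | [p0, p1, p2, p3, p4], _ =>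
      rw [if_neg (by simp)]
      rw [show PySem.List.pyRange 0 (([['Z','_'],['A','_'],['B','_'],['C','_'],['D','_']] : List (List Char)).length : Int) 1 = [0,1,2,3,4] from rfl]
      simp only [check_short_link_py_loop, pv_slice2, pvChk, pvLetters,
        show ∀ (a b c d e : List Char), PySem.List.pyGetD [a,b,c,d,e] 0 [] = a from fun _ _ _ _ _ => rfl,
        show ∀ (a b c d e : List Char), PySem.List.pyGetD [a,b,c,d,e] 1 [] = b from fun _ _ _ _ _ => rfl,
        show ∀ (a b c d e : List Char), PySem.List.pyGetD [a,b,c,d,e] 2 [] = c from fun _ _ _ _ _ => rfl,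
        show ∀ (a b c d e : List Char), PySem.List.pyGetD [a,b,c,d,e] 3 [] = d from fun _ _ _ _ _ => rfl,
        show ∀ (a b c d e : List Char), PySem.List.pyGetD [a,b,c,d,e] 4 [] = e from fun _ _ _ _ _ => rfl]
      split_ifs <;> simp_all
  · rw [if_pos (by simp only [List.length_cons, List.length_nil]; omega),
      if_neg (fun hc => h5 (by simpa [pvLetters] using pv_chk_length parts pvLetters hc))]

lemma pv_segOK_nil (seg pos : Nat) : pvSegOK seg pos [] = decide (2 ≤ pos) := by
  unfold pvSegOK
  split_ifs with h1 h2 <;> simp_all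

lemma pv_alt_inv (cs : List Char) : ∀ (seg pos : Nat) (g : List Char) (gs : List (List Char)), seg ≤ 4 →
    List.splitOnP (· == '/') cs = g :: gs →
    check_short_link_py_altLoop cs seg pos
      = if pvSegOK seg pos g && pvChk gs (pvLetters.drop (seg + 1)) then 1 else 0 := by
  induction cs with
  | nil =>
    intro seg pos g gs hseg h
    rw [List.splitOnP_nil] at h
    injection h with h1 h2; subst h1; subst h2
    have hchk : pvChk [] (pvLetters.drop (seg + 1)) = (seg == 4) := by
      interval_cases seg <;> decide
    simp only [check_short_link_py_altLoop, pv_segOK_nil, hchk]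
    by_cases h1 : seg = 4 <;> by_cases h2 : 2 ≤ pos <;> simp [h1, h2]
  | cons c cs ih =>
    intro seg pos g gs hseg h
    rw [List.splitOnP_cons] at h
    by_cases hc : c = '/'
    · subst hc
      rw [if_pos (by simp)] at h
      injection h with h1 h2; subst h1; subst h2
      have hstep : check_short_link_py_altLoop ('/' :: cs) seg pos
          = if pos < 2 ∨ seg = 4 then 0 else check_short_link_py_altLoop cs (seg + 1) 0 := by
        simp [check_short_link_py_altLoop]
      rw [hstep]
      by_cases hp2 : pos < 2
      · rw [if_pos (Or.inl hp2)]
        have hso : pvSegOK seg pos [] = false := by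
          rw [pv_segOK_nil]; simpa using hp2
        simp [hso]
      · by_cases hs4 : seg = 4
        · rw [if_pos (Or.inr hs4)]; subst hs4
          obtain ⟨g0, gs0, h0⟩ : ∃ g0 gs0, List.splitOnP (· == '/') cs = g0 :: gs0 := by
            cases hx : List.splitOnP (· == '/') cs with
            | nil => exact absurd hx (List.splitOnP_ne_nil _ _)
            | cons a t => exact ⟨a, t, rfl⟩
          rw [h0]
          simp [pvChk, pvLetters]
        · rw [if_neg (by tauto)]
          obtain ⟨g0, gs0, h0⟩ : ∃ g0 gs0, List.splitOnP (· == '/') cs = g0 :: gs0 := by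
            cases hx : List.splitOnP (· == '/') cs with
            | nil => exact absurd hx (List.splitOnP_ne_nil _ _)
            | cons a t => exact ⟨a, t, rfl⟩
          rw [ih (seg + 1) 0 g0 gs0 (by omega) h0, h0]
          have hso : pvSegOK seg pos [] = true := by
            rw [pv_segOK_nil]; simpa using by omega
          have hdrop : pvLetters.drop (seg + 1) = pvLetters.getD (seg + 1) ' ' :: pvLetters.drop (seg + 2) := by
            have : seg ≤ 3 := by omega
            interval_cases seg <;> decide
          rw [hdrop]
          have hso0 : pvSegOK (seg + 1) 0 g0 = (g0.take 2 == [pvLetters.getD (seg + 1) ' ', '_']) := by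
            unfold pvSegOK; rw [if_neg (by omega), if_neg (by omega)]
          simp [pvChk, hso, hso0]
    · rw [if_neg (by simpa using hc)] at h
      obtain ⟨g0, gs0, h0⟩ : ∃ g0 gs0, List.splitOnP (· == '/') cs = g0 :: gs0 := by
        cases hx : List.splitOnP (· == '/') cs with
        | nil => exact absurd hx (List.splitOnP_ne_nil _ _)
        | cons a t => exact ⟨a, t, rfl⟩
      rw [h0] at h
      simp only [List.modifyHead] at h
      injection h with h1 h2; subst h1; subst h2
      have hstep : check_short_link_py_altLoop (c :: cs) seg pos
          = if (pos = 0 ∧ c ≠ pvLetters.getD seg ' ') ∨ (pos = 1 ∧ c ≠ '_') then 0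
            else check_short_link_py_altLoop cs seg (pos + 1) := by
        simp [check_short_link_py_altLoop, hc]
      rw [hstep]
      by_cases hf : (pos = 0 ∧ c ≠ pvLetters.getD seg ' ') ∨ (pos = 1 ∧ c ≠ '_')
      · rw [if_pos hf]
        have hso : pvSegOK seg pos (c :: g0) = false := by
          rcases hf with ⟨hp, hne⟩ | ⟨hp, hne⟩ <;> subst hp <;>
            simp [pvSegOK, List.take_succ_cons, hne] <;> simp_all
        simp [hso]
      · rw [if_neg hf, ih seg (pos + 1) g0 gs0 hseg h0]
        have hso : pvSegOK seg pos (c :: g0) = pvSegOK seg (pos + 1) g0 := by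
          push Not at hf
          rcases Nat.lt_or_ge pos 2 with hp | hp
          · interval_cases pos
            · have := hf.1 rfl
              subst this
              simp [pvSegOK, List.take_succ_cons]
            · have := hf.2 rfl
              subst this
              simp [pvSegOK, List.take_succ_cons]
          · unfold pvSegOK
            rw [if_pos hp, if_pos (by omega)]
        rw [hso]

-- ===== VERDICT (by name: the statement is the Claim_ definition above) =====
theorem check_short_link_py_spec : Claim_equal_check_short_link_py := by
  intro s _
  unfold Spec_check_short_link_py
  rw [pv_a_eq, check_short_link_py_alt]
  obtain ⟨g, gs, h⟩ : ∃ g gs, List.splitOnP (· == '/') s.toList = g :: gs := by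
    cases hx : List.splitOnP (· == '/') s.toList with
    | nil => exact absurd hx (List.splitOnP_ne_nil _ _)
    | cons a t => exact ⟨a, t, rfl⟩
  rw [pv_alt_inv s.toList 0 0 g gs (by omega) h, h]
  simp [pvChk, pvSegOK, pvLetters]
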